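-- pv_equiv track=rewrite | github.com/tlijkkkk/mark_v | leetcode-practice/leetcode_practice/two_pointers/leetcode1616_split_two_strings_make_palindrome.py | split_two_strings_make_palindrome
-- ===== SOURCE A (Python) =====
-- def split_two_strings_make_palindrome(a: str, b: str) -> bool:
--     n = len(a)
--
--     def is_palindrome(s1: str, s2: str, i: int, j: int, allow_mismatch) -> bool:
--         while i < j:
--             if s1[i] != s2[j]:
--                 if allow_mismatch:
--                     return is_palindrome(a, a, i, j, False) or is_palindrome(b, b, i, j, False)
--                 else:
--                     return False
--             i += 1
--             j -= 1
--         return True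
--
--     return is_palindrome(a, b, 0, n - 1, True) or is_palindrome(b, a, 0, n - 1, True)
-- ===== SOURCE B (Python) =====
-- def split_two_strings_make_palindrome(a: str, b: str) -> bool:
--     n = len(a)
--
--     def check(s1: str, s2: str) -> bool:
--         i, j = 0, n - 1
--         while i < j:
--             if s1[i] != s2[j]:
--                 # first mismatch: the remaining inner window must already be a
--                 # palindrome entirely within a or entirely within b
--                 return a[i:j + 1] == a[i:j + 1][::-1] or b[i:j + 1] == b[i:j + 1][::-1]
--             i += 1
--             j -= 1
--         return True
--
--     return check(a, b) or check(b, a)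
-- ===== Notes on version B (the rewrite author's own statement) =====
-- stated objective: simpler
-- what changed: Replaces the single recursive allow_mismatch-threaded helper with a plain iterative two-pointer scan whose mismatch case is a closed-form slice-and-reverse palindrome test on the inner window.
import Mathlib
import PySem

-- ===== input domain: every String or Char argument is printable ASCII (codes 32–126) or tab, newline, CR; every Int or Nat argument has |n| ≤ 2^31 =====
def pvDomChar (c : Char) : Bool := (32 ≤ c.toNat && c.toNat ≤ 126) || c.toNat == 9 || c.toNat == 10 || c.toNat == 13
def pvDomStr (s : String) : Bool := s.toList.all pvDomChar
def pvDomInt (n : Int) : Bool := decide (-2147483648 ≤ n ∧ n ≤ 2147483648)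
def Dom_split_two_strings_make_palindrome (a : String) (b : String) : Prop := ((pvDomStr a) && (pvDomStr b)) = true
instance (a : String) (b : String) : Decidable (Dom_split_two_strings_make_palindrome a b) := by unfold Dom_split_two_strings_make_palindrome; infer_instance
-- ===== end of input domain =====

-- B replaces A's recursive allow_mismatch-threaded helper by an iterative two-pointer
-- scan whose mismatch case is a closed-form slice-and-reverse palindrome test (simpler).

-- ===== PORT A =====
-- the inner recursive helper is_palindrome (the while loop is the i+1/j-1 recursion;
-- indexing s[k] is in range on every input Pre_ admits, ported with pyGetD)
def pvA_isPal (a b : List Char) (s1 s2 : List Char) (i j : Int) (allow : Bool) : Bool :=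
  if _h : i < j then
    if PySem.List.pyGetD s1 i ' ' ≠ PySem.List.pyGetD s2 j ' ' then
      if _ha : allow then
        pvA_isPal a b a a i j false || pvA_isPal a b b b i j false
      else
        false
    else
      pvA_isPal a b s1 s2 (i + 1) (j - 1) allow
  else
    true
termination_by 2 * (j - i).toNat + (if allow then 1 else 0)
decreasing_by
  · simp [_ha]
  · simp [_ha]
  · cases allow <;> simp <;> omega

def split_two_strings_make_palindrome (a : String) (b : String) : Bool :=
  pvA_isPal a.toList b.toList a.toList b.toList 0 ((a.toList.length : Int) - 1) true ||
  pvA_isPal a.toList b.toList b.toList a.toList 0 ((a.toList.length : Int) - 1) true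

-- ===== PORT B =====
-- B's inner window test: a[i:j+1] == a[i:j+1][::-1]
def pvB_palSlice (s : List Char) (i j : Int) : Bool :=
  let w := PySem.List.slice s (some i) (some (j + 1))
  w == w.reverse

-- B's check(s1, s2): iterative two-pointer scan (the while loop as recursion)
def pvB_check (a b : List Char) (s1 s2 : List Char) (i j : Int) : Bool :=
  if i < j then
    if PySem.List.pyGetD s1 i ' ' ≠ PySem.List.pyGetD s2 j ' ' then
      pvB_palSlice a i j || pvB_palSlice b i j
    else
      pvB_check a b s1 s2 (i + 1) (j - 1)
  else
    true
termination_by (j - i).toNat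
decreasing_by omega

def split_two_strings_make_palindrome_alt (a : String) (b : String) : Bool :=
  pvB_check a.toList b.toList a.toList b.toList 0 ((a.toList.length : Int) - 1) ||
  pvB_check a.toList b.toList b.toList a.toList 0 ((a.toList.length : Int) - 1)

-- ===== PRECONDITION & SPEC =====
-- Python A raises IndexError (reading b[len(a)-1]) exactly when b is shorter than a
-- and len(a) ≥ 2 (with len(a) ≤ 1 the loop body never runs and A returns True).
def Pre_split_two_strings_make_palindrome (a : String) (b : String) : Prop :=
  a.toList.length ≤ b.toList.length ∨ a.toList.length ≤ 1
instance (a : String) (b : String) : Decidable (Pre_split_two_strings_make_palindrome a b) := by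
  unfold Pre_split_two_strings_make_palindrome; infer_instance

def pvWitness_split_two_strings_make_palindrome : String × String := ("abx", "xya")

def Spec_split_two_strings_make_palindrome (a : String) (b : String) (out : Bool) : Prop := out = split_two_strings_make_palindrome_alt a b
instance (a : String) (b : String) (out : Bool) : Decidable (Spec_split_two_strings_make_palindrome a b out) := by unfold Spec_split_two_strings_make_palindrome; infer_instance

-- ===== CLAIM (what is proved, stated in full; the proofs are below) =====
def Claim_equal_split_two_strings_make_palindrome : Prop := ∀ (a : String) (b : String), Dom_split_two_strings_make_palindrome a b → Pre_split_two_strings_make_palindrome a b → Spec_split_two_strings_make_palindrome a b (split_two_strings_make_palindrome a b)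

-- ===== LEMMAS AND PROOFS =====

-- list BEq is decide of equality
theorem pv_beq_decide {α : Type} [DecidableEq α] (u v : List α) : (u == v) = decide (u = v) := by
  by_cases h : u = v <;> simp [h]

theorem pv_beq_decide_char (x y : Char) : (x == y) = decide (x = y) := by
  by_cases h : x = y <;> simp [h]

-- peeling the two ends off a palindrome equation
theorem pv_pal_step (x y : Char) (m : List Char) :
    ((x :: (m ++ [y]) : List Char) = (x :: (m ++ [y])).reverse) ↔ (x = y ∧ m = m.reverse) := by
  rw [List.reverse_cons, List.reverse_append, List.reverse_cons, List.reverse_nil,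
      List.nil_append, List.singleton_append, List.cons_append, List.cons.injEq]
  constructor
  · rintro ⟨hx, hm⟩
    subst hx
    exact ⟨rfl, List.append_cancel_right hm⟩
  · rintro ⟨hx, hm⟩
    subst hx
    exact ⟨rfl, by rw [← hm]⟩

theorem pv_pal_cons_concat (x y : Char) (m : List Char) :
    ((x :: (m ++ [y]) : List Char) == (x :: (m ++ [y])).reverse) =
      (x == y && (m == m.reverse)) := by
  rw [pv_beq_decide, pv_beq_decide, pv_beq_decide_char, ← Bool.decide_and]
  exact decide_eq_decide.mpr (pv_pal_step x y m)

-- in-range slice decomposition: s[i:j+1] = s[i] :: s[i+1:j] ++ [s[j]] for 0 ≤ i < j < |s|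
theorem pv_slice_decomp (s : List Char) (i j : Int) (h0 : 0 ≤ i) (hij : i < j)
    (hj : j < (s.length : Int)) :
    PySem.List.slice s (some i) (some (j + 1)) =
      s[i.toNat]'(by omega) :: (PySem.List.slice s (some (i + 1)) (some j) ++ [s[j.toNat]'(by omega)]) := by
  rw [PySem.List.slice_toNat s h0 (by omega), PySem.List.slice_toNat s (by omega) (by omega)]
  have hi' : i.toNat < s.length := by omega
  rw [List.drop_eq_getElem_cons hi']
  have h1 : (j + 1).toNat - i.toNat = ((j.toNat - (i+1).toNat) + 1) + 1 := by omega
  rw [h1, List.take_succ_cons]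
  congr 1
  have h2 : (i + 1).toNat = i.toNat + 1 := by omega
  rw [h2, List.take_add_one]
  congr 1
  have h3 : j.toNat - (i.toNat + 1) < (s.drop (i.toNat + 1)).length := by
    simp [List.length_drop]; omega
  rw [List.getElem?_eq_getElem h3]
  simp [List.getElem_drop]
  congr 1
  omega

-- A's mismatch-free self-scan of s equals B's slice-and-reverse test
theorem pv_scan_eq_slice (a b : List Char) (s : List Char) (i j : Int)
    (h0 : 0 ≤ i) (hlo : i - 1 ≤ j) (hj : j < (s.length : Int)) :
    pvA_isPal a b s s i j false = pvB_palSlice s i j := by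
  by_cases hij : i < j
  case neg =>
    rw [pvA_isPal, pvB_palSlice]
    simp only [hij, dite_false]
    by_cases hje : i = j
    · subst hje
      rw [PySem.List.slice_toNat s h0 (by omega)]
      have h1 : (i + 1).toNat - i.toNat = 1 := by omega
      rw [h1]
      rcases s.drop i.toNat with _ | ⟨c, t⟩ <;> simp
    · rw [PySem.List.slice_toNat s h0 (by omega)]
      have h1 : (j + 1).toNat - i.toNat = 0 := by omega
      rw [h1]
      simp
  case pos =>
    have hterm : (j - 1 - (i + 1)).toNat < (j - i).toNat := by omega
    rw [pvA_isPal, pvB_palSlice]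
    simp only [hij, dite_true]
    rw [pv_slice_decomp s i j h0 hij hj, pv_pal_cons_concat]
    have hgi : PySem.List.pyGetD s i ' ' = s[i.toNat]'(by omega) :=
      PySem.List.pyGetD_eq_getElem s ' ' h0 (by omega)
    have hgj : PySem.List.pyGetD s j ' ' = s[j.toNat]'(by omega) :=
      PySem.List.pyGetD_eq_getElem s ' ' (by omega) hj
    by_cases hne : PySem.List.pyGetD s i ' ' ≠ PySem.List.pyGetD s j ' '
    · rw [if_pos hne]
      rw [hgi, hgj] at hne
      simp [hne]
    · rw [if_neg hne]
      rw [hgi, hgj] at hne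
      replace hne := not_not.mp hne
      have hrec := pv_scan_eq_slice a b s (i + 1) (j - 1) (by omega) (by omega) (by omega)
      rw [hrec, pvB_palSlice]
      have h1 : j - 1 + 1 = j := by omega
      rw [h1]
      simp [hne]
termination_by (j - i).toNat

-- degenerate window: both loops return True immediately
theorem pvA_base (a b s1 s2 : List Char) (i j : Int) (al : Bool) (h : ¬ i < j) :
    pvA_isPal a b s1 s2 i j al = true := by
  rw [pvA_isPal]; simp [h]

theorem pvB_base (a b s1 s2 : List Char) (i j : Int) (h : ¬ i < j) :
    pvB_check a b s1 s2 i j = true := by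
  rw [pvB_check]; simp [h]

-- A's outer scan equals B's check, for windows inside both strings
theorem pv_outer_eq (a b : List Char) (s1 s2 : List Char) (i j : Int)
    (h0 : 0 ≤ i) (ha : j < (a.length : Int)) (hb : j < (b.length : Int)) :
    pvA_isPal a b s1 s2 i j true = pvB_check a b s1 s2 i j := by
  by_cases hij : i < j
  case neg =>
    rw [pvA_isPal, pvB_check]
    simp [hij]
  case pos =>
    have hterm : (j - 1 - (i + 1)).toNat < (j - i).toNat := by omega
    rw [pvA_isPal, pvB_check]
    simp only [hij, dite_true, if_pos]
    by_cases hne : PySem.List.pyGetD s1 i ' ' ≠ PySem.List.pyGetD s2 j ' '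
    · rw [if_pos hne, if_pos hne]
      rw [pv_scan_eq_slice a b a i j h0 (by omega) ha, pv_scan_eq_slice a b b i j h0 (by omega) hb]
    · rw [if_neg hne, if_neg hne]
      exact pv_outer_eq a b s1 s2 (i + 1) (j - 1) (by omega) (by omega) (by omega)
termination_by (j - i).toNat

-- ===== VERDICT (by name: the statement is the Claim_ definition above) =====
theorem split_two_strings_make_palindrome_spec : Claim_equal_split_two_strings_make_palindrome := by
  intro a b _hdom hpre
  unfold Spec_split_two_strings_make_palindrome
  unfold split_two_strings_make_palindrome split_two_strings_make_palindrome_alt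
  by_cases hsmall : a.toList.length ≤ 1
  · have h : ¬ ((0 : Int) < (a.toList.length : Int) - 1) := by omega
    rw [pvA_base _ _ _ _ _ _ _ h, pvA_base _ _ _ _ _ _ _ h,
        pvB_base _ _ _ _ _ _ h, pvB_base _ _ _ _ _ _ h]
  · have hpre' : a.toList.length ≤ b.toList.length := by
      rcases hpre with h | h
      · exact h
      · omega
    rw [pv_outer_eq _ _ _ _ _ _ (by omega) (by omega) (by omega),
        pv_outer_eq _ _ _ _ _ _ (by omega) (by omega) (by omega)]
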